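-- pv_equiv track=rewrite | github.com/Bmotloch/Compressioneer | compressor.py | create_zig_zag_pattern
-- ===== SOURCE A (Python) =====
-- def create_zig_zag_pattern(block_size_=8):
--     zz_pattern = []
--     x_idx, y_idx = 0, 0
--     direction_flag = 1
--
--     for i in range(block_size_ ** 2):
--         zz_pattern.append((x_idx, y_idx))
--
--         if direction_flag == 1:
--             if y_idx == block_size_ - 1:
--                 x_idx += 1
--                 direction_flag = -1
--             elif x_idx == 0:
--                 y_idx += 1
--                 direction_flag = -1
--             else:
--                 x_idx -= 1
--                 y_idx += 1
--         else:
--             if x_idx == block_size_ - 1: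
--                 y_idx += 1
--                 direction_flag = 1
--             elif y_idx == 0:
--                 x_idx += 1
--                 direction_flag = 1
--             else:
--                 x_idx += 1
--                 y_idx -= 1
--
--     return zz_pattern
-- ===== SOURCE B (Python) =====
-- def create_zig_zag_pattern(block_size_=8):
--     # Enumerate anti-diagonals directly: diagonal s holds all (x, s-x);
--     # even diagonals descend in x, odd diagonals ascend.
--     pattern = []
--     n = block_size_
--     for s in range(2 * n - 1):
--         lo = max(0, s - (n - 1))
--         hi = min(n - 1, s)
--         xs = range(hi, lo - 1, -1) if s % 2 == 0 else range(lo, hi + 1)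
--         for x in xs:
--             pattern.append((x, s - x))
--     return pattern
-- ===== Notes on version B (the rewrite author's own statement) =====
-- stated objective: simpler
-- what changed: B enumerates the zig-zag pattern anti-diagonal by anti-diagonal with a closed-form start/end per diagonal (even diagonals descend in x, odd ascend), instead of A's stateful single-step walk with a direction flag and per-step boundary tests.
-- outside the precondition, e.g. on create_zig_zag_pattern(-2): A returns [(0, 0), (0, 1), (1, 0), (2, 0)], B returns []
import Mathlib
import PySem

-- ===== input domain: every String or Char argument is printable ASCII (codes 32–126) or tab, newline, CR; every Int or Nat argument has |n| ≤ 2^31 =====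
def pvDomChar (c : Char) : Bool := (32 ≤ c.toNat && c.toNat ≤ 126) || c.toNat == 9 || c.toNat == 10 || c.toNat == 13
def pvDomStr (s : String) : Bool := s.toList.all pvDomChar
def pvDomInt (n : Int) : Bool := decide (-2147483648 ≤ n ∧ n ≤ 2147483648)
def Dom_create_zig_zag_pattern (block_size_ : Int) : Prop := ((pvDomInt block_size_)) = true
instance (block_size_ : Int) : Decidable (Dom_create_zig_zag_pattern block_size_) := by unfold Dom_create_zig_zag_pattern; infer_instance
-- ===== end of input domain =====

-- B replaces A's stateful single-step zig-zag walk by direct anti-diagonal enumeration (simpler structure, same cost).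


-- ===== PORT A =====
-- the for-loop of A: fuel = remaining iterations, state (x_idx, y_idx, direction_flag)
def pvWalkA (n : Int) : Nat → Int → Int → Int → List (Int × Int)
  | 0, _, _, _ => []
  | k+1, x, y, d =>
    (x, y) ::
      (if d = 1 then
        if y = n - 1 then pvWalkA n k (x+1) y (-1)
        else if x = 0 then pvWalkA n k x (y+1) (-1)
        else pvWalkA n k (x-1) (y+1) d
      else
        if x = n - 1 then pvWalkA n k x (y+1) 1
        else if y = 0 then pvWalkA n k (x+1) y 1
        else pvWalkA n k (x+1) (y-1) d)

def create_zig_zag_pattern (block_size_ : Int) : List (Int × Int) :=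
  pvWalkA block_size_ ((block_size_ ^ 2).toNat) 0 0 1

-- ===== PORT B =====
def create_zig_zag_pattern_alt (block_size_ : Int) : List (Int × Int) :=
  (PySem.List.pyRange 0 (2 * block_size_ - 1) 1).foldl
    (fun acc s =>
      let lo := max 0 (s - (block_size_ - 1))
      let hi := min (block_size_ - 1) s
      let xs := if s % 2 = 0 then PySem.List.pyRange hi (lo - 1) (-1)
                else PySem.List.pyRange lo (hi + 1) 1
      acc ++ xs.map (fun x => (x, s - x))) []

-- ===== PRECONDITION & SPEC =====
-- Pre_ restricts to nonnegative block sizes, the function's natural domain; for a negative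
-- size A still returns an n²-step walk whose boundary tests describe no real block, while B
-- naturally returns [] (no diagonals).
def Pre_create_zig_zag_pattern (block_size_ : Int) : Prop := 0 ≤ block_size_
instance (block_size_ : Int) : Decidable (Pre_create_zig_zag_pattern block_size_) := by
  unfold Pre_create_zig_zag_pattern; infer_instance

def pvWitness_create_zig_zag_pattern : Int := 3

def Spec_create_zig_zag_pattern (block_size_ : Int) (out : List (Int × Int)) : Prop := out = create_zig_zag_pattern_alt block_size_
instance (block_size_ : Int) (out : List (Int × Int)) : Decidable (Spec_create_zig_zag_pattern block_size_ out) := by unfold Spec_create_zig_zag_pattern; infer_instance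

-- ===== CLAIM (what is proved, stated in full; the proofs are below) =====
def Claim_equal_create_zig_zag_pattern : Prop := ∀ (block_size_ : Int), Dom_create_zig_zag_pattern block_size_ → Pre_create_zig_zag_pattern block_size_ → Spec_create_zig_zag_pattern block_size_ (create_zig_zag_pattern block_size_)

-- ===== LEMMAS AND PROOFS =====

-- one diagonal of B, and the state A's walk is in when it starts diagonal s
def pvDiag (n s : Int) : List (Int × Int) :=
  let lo := max 0 (s - (n - 1))
  let hi := min (n - 1) s
  let xs := if s % 2 = 0 then PySem.List.pyRange hi (lo - 1) (-1)
            else PySem.List.pyRange lo (hi + 1) 1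
  xs.map (fun x => (x, s - x))

def pvLen (n s : Int) : Int := min (n - 1) s - max 0 (s - (n - 1)) + 1

def pvSX (n s : Int) : Int := if s % 2 = 0 then min (n - 1) s else max 0 (s - (n - 1))
def pvSY (n s : Int) : Int := s - pvSX n s
def pvSD (s : Int) : Int := if s % 2 = 0 then 1 else -1

-- total number of cells in the last r diagonals
def pvF (n : Int) : Nat → Int
  | 0 => 0
  | r+1 => pvLen n (2*n - 1 - ((r : Int) + 1)) + pvF n r

lemma pvLen_pos (n s : Int) (_hn : 1 ≤ n) (hs0 : 0 ≤ s) (hs : s ≤ 2*n - 2) : 1 ≤ pvLen n s := by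
  unfold pvLen; omega

lemma pvF_nonneg (n : Int) (hn : 1 ≤ n) : ∀ r : Nat, (r : Int) ≤ 2*n - 1 → 0 ≤ pvF n r := by
  intro r
  induction r with
  | zero => intro _; simp [pvF]
  | succ r ih =>
    intro h
    have h1 : 1 ≤ pvLen n (2*n - 1 - ((r : Int) + 1)) := by
      apply pvLen_pos n _ hn <;> push_cast at h <;> omega
    have h2 := ih (by push_cast at h ⊢; omega)
    simp only [pvF]; omega

lemma pvF_double (n : Int) : ∀ r : Nat, (r : Int) ≤ 2*n - 1 →
    2 * pvF n r = if (r : Int) ≤ n then (r : Int) * ((r : Int) + 1)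
                  else 2*n^2 - (2*n - 1 - (r : Int)) * (2*n - (r : Int)) := by
  intro r
  induction r with
  | zero => intro _; rw [if_pos (by push_cast; omega)]; simp [pvF]
  | succ r ih =>
    intro h
    have hr : (r : Int) ≤ 2*n - 1 := by push_cast at h; omega
    have IH := ih hr
    simp only [pvF]
    push_cast at h ⊢
    by_cases hc : (r : Int) + 1 ≤ n
    · have hl : pvLen n (2*n - 1 - ((r : Int) + 1)) = (r : Int) + 1 := by unfold pvLen; omega
      rw [if_pos hc] at *
      rw [if_pos (by omega)] at IH
      rw [hl]; linear_combination IH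
    · have hl : pvLen n (2*n - 1 - ((r : Int) + 1)) = 2*n - 1 - (r : Int) := by unfold pvLen; omega
      rw [if_neg hc, hl]
      by_cases hc2 : (r : Int) ≤ n
      · have hrn : (r : Int) = n := by omega
        rw [if_pos hc2, hrn] at IH
        rw [hrn]; linear_combination IH
      · rw [if_neg hc2] at IH
        linear_combination IH

lemma pvF_value (n : Int) (hn : 1 ≤ n) : pvF n ((2*n - 1).toNat) = n^2 := by
  have hd := pvF_double n ((2*n - 1).toNat) (by omega)
  have hc : (((2*n - 1).toNat : Nat) : Int) = 2*n - 1 := by omega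
  rw [hc] at hd
  by_cases h1 : 2*n - 1 ≤ n
  · have : n = 1 := by omega
    subst this; decide
  · rw [if_neg h1] at hd
    have : (2*n - 1 - (2*n - 1)) * (2*n - (2*n - 1)) = 0 := by ring
    rw [this] at hd; linarith

-- even diagonal: walking from x down to lo produces the diagonal's tail and lands on the start of diagonal s+1
lemma even_run (n s : Int) (_hn : 1 ≤ n) (_hs0 : 0 ≤ s) (_hs : s ≤ 2*n - 2) (he : s % 2 = 0) :
    ∀ (c : Nat) (x : Int) (k : Nat),
      max 0 (s - (n - 1)) ≤ x → x ≤ min (n - 1) s → x - max 0 (s - (n - 1)) = (c : Int) →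
      pvWalkA n (c + 1 + k) x (s - x) 1
        = (PySem.List.pyRange x (max 0 (s - (n - 1)) - 1) (-1)).map (fun t => (t, s - t))
          ++ pvWalkA n k (pvSX n (s + 1)) (pvSY n (s + 1)) (pvSD (s + 1)) := by
  intro c
  induction c with
  | zero =>
    intro x k hlo hhi hc
    rw [PySem.List.pyRange_neg_one_cons (by omega), PySem.List.pyRange_neg_one_eq_nil (by omega)]
    have hf : 0 + 1 + k = k + 1 := by omega
    rw [hf]
    simp only [pvWalkA, if_true, List.map_cons, List.map_nil, List.cons_append, List.nil_append]
    by_cases hcase : n - 1 ≤ s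
    · rw [if_pos (show s - x = n - 1 by omega)]
      have e1 : pvSX n (s + 1) = x + 1 := by
        simp only [pvSX]; rw [if_neg (show ¬ (s + 1) % 2 = 0 by omega)]; omega
      have e2 : pvSY n (s + 1) = s - x := by simp only [pvSY, e1]; ring
      have e3 : pvSD (s + 1) = -1 := by simp only [pvSD]; rw [if_neg (show ¬ (s + 1) % 2 = 0 by omega)]
      rw [e1, e2, e3]
    · rw [if_neg (show ¬ s - x = n - 1 by omega), if_pos (show x = 0 by omega)]
      have e1 : pvSX n (s + 1) = x := by
        simp only [pvSX]; rw [if_neg (show ¬ (s + 1) % 2 = 0 by omega)]; omega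
      have e2 : pvSY n (s + 1) = s - x + 1 := by simp only [pvSY, e1]; omega
      have e3 : pvSD (s + 1) = -1 := by simp only [pvSD]; rw [if_neg (show ¬ (s + 1) % 2 = 0 by omega)]
      rw [e1, e2, e3]
  | succ c ih =>
    intro x k hlo hhi hc
    have hf : c + 1 + 1 + k = (c + 1 + k) + 1 := by omega
    rw [hf]
    simp only [pvWalkA, if_true]
    rw [if_neg (show ¬ s - x = n - 1 by push_cast at hc; omega),
      if_neg (show ¬ x = 0 by push_cast at hc; omega)]
    rw [PySem.List.pyRange_neg_one_cons (by push_cast at hc; omega), List.map_cons, List.cons_append]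
    have hy : s - x + 1 = s - (x - 1) := by ring
    rw [hy, ih (x - 1) k (by push_cast at hc ⊢; omega) (by omega) (by push_cast at hc ⊢; omega)]

-- odd diagonal: walking from x up to hi
lemma odd_run (n s : Int) (_hn : 1 ≤ n) (_hs0 : 0 ≤ s) (_hs : s ≤ 2*n - 2) (he : ¬ s % 2 = 0) :
    ∀ (c : Nat) (x : Int) (k : Nat),
      max 0 (s - (n - 1)) ≤ x → x ≤ min (n - 1) s → min (n - 1) s - x = (c : Int) →
      pvWalkA n (c + 1 + k) x (s - x) (-1)
        = (PySem.List.pyRange x (min (n - 1) s + 1) 1).map (fun t => (t, s - t))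
          ++ pvWalkA n k (pvSX n (s + 1)) (pvSY n (s + 1)) (pvSD (s + 1)) := by
  intro c
  induction c with
  | zero =>
    intro x k hlo hhi hc
    rw [PySem.List.pyRange_one_cons (by omega), PySem.List.pyRange_one_eq_nil (by omega)]
    have hf : 0 + 1 + k = k + 1 := by omega
    rw [hf]
    simp only [pvWalkA, if_neg (by norm_num : ¬ (-1 : Int) = 1), List.map_cons, List.map_nil,
      List.cons_append, List.nil_append]
    by_cases hcase : n - 1 ≤ s
    · rw [if_pos (show x = n - 1 by omega)]
      have e1 : pvSX n (s + 1) = x := by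
        simp only [pvSX]; rw [if_pos (show (s + 1) % 2 = 0 by omega)]; omega
      have e2 : pvSY n (s + 1) = s - x + 1 := by simp only [pvSY, e1]; omega
      have e3 : pvSD (s + 1) = 1 := by simp only [pvSD]; rw [if_pos (show (s + 1) % 2 = 0 by omega)]
      rw [e1, e2, e3]
    · rw [if_neg (show ¬ x = n - 1 by omega), if_pos (show s - x = 0 by omega)]
      have e1 : pvSX n (s + 1) = x + 1 := by
        simp only [pvSX]; rw [if_pos (show (s + 1) % 2 = 0 by omega)]; omega
      have e2 : pvSY n (s + 1) = s - x := by simp only [pvSY, e1]; omega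
      have e3 : pvSD (s + 1) = 1 := by simp only [pvSD]; rw [if_pos (show (s + 1) % 2 = 0 by omega)]
      rw [e1, e2, e3]
  | succ c ih =>
    intro x k hlo hhi hc
    have hf : c + 1 + 1 + k = (c + 1 + k) + 1 := by omega
    rw [hf]
    simp only [pvWalkA, if_neg (by norm_num : ¬ (-1 : Int) = 1)]
    rw [if_neg (show ¬ x = n - 1 by push_cast at hc; omega),
      if_neg (show ¬ s - x = 0 by push_cast at hc; omega)]
    rw [PySem.List.pyRange_one_cons (by push_cast at hc; omega), List.map_cons, List.cons_append]
    have hy : s - x - 1 = s - (x + 1) := by ring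
    rw [hy, ih (x + 1) k (by omega) (by push_cast at hc ⊢; omega) (by push_cast at hc ⊢; omega)]

-- one whole diagonal: len(s) steps from the diagonal's start state produce pvDiag n s
lemma diag_run (n s : Int) (hn : 1 ≤ n) (hs0 : 0 ≤ s) (hs : s ≤ 2*n - 2) (k : Nat) :
    pvWalkA n ((pvLen n s).toNat + k) (pvSX n s) (pvSY n s) (pvSD s)
      = pvDiag n s ++ pvWalkA n k (pvSX n (s + 1)) (pvSY n (s + 1)) (pvSD (s + 1)) := by
  have hlh : max 0 (s - (n - 1)) ≤ min (n - 1) s := by omega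
  by_cases he : s % 2 = 0
  · have hL : (pvLen n s).toNat = (min (n - 1) s - max 0 (s - (n - 1))).toNat + 1 := by
      unfold pvLen; omega
    rw [hL]
    have e1 : pvSX n s = min (n - 1) s := by simp only [pvSX]; rw [if_pos he]
    have e2 : pvSY n s = s - min (n - 1) s := by simp only [pvSY, e1]
    have e3 : pvSD s = 1 := by simp only [pvSD]; rw [if_pos he]
    rw [e1, e2, e3]
    rw [even_run n s hn hs0 hs he _ _ k hlh le_rfl (by omega)]
    simp only [pvDiag, if_pos he]
  · have hL : (pvLen n s).toNat = (min (n - 1) s - max 0 (s - (n - 1))).toNat + 1 := by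
      unfold pvLen; omega
    rw [hL]
    have e1 : pvSX n s = max 0 (s - (n - 1)) := by simp only [pvSX]; rw [if_neg he]
    have e2 : pvSY n s = s - max 0 (s - (n - 1)) := by simp only [pvSY, e1]
    have e3 : pvSD s = -1 := by simp only [pvSD]; rw [if_neg he]
    rw [e1, e2, e3]
    rw [odd_run n s hn hs0 hs he _ _ k le_rfl hlh (by omega)]
    simp only [pvDiag, if_neg he]

-- the walk from the start of diagonal 2n-1-r with exactly the remaining fuel produces the last r diagonals
lemma walk_suffix (n : Int) (hn : 1 ≤ n) : ∀ r : Nat, (r : Int) ≤ 2*n - 1 →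
    pvWalkA n ((pvF n r).toNat) (pvSX n (2*n - 1 - (r : Int))) (pvSY n (2*n - 1 - (r : Int))) (pvSD (2*n - 1 - (r : Int)))
      = (PySem.List.pyRange (2*n - 1 - (r : Int)) (2*n - 1) 1).flatMap (pvDiag n) := by
  intro r
  induction r with
  | zero =>
    intro _
    rw [PySem.List.pyRange_one_eq_nil (by omega)]
    simp [pvF, pvWalkA]
  | succ r ih =>
    intro h
    push_cast at h
    have hL : 1 ≤ pvLen n (2*n - 1 - ((r : Int) + 1)) :=
      pvLen_pos n _ hn (by omega) (by omega)
    have hF : 0 ≤ pvF n r := pvF_nonneg n hn r (by omega)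
    have hfuel : (pvF n (r + 1)).toNat = (pvLen n (2*n - 1 - ((r : Int) + 1))).toNat + (pvF n r).toNat := by
      simp only [pvF]; omega
    have hcast : ((r + 1 : Nat) : Int) = (r : Int) + 1 := by push_cast; ring
    rw [hcast, hfuel, diag_run n (2*n - 1 - ((r : Int) + 1)) hn (by omega) (by omega)]
    have hsucc : 2*n - 1 - ((r : Int) + 1) + 1 = 2*n - 1 - (r : Int) := by ring
    rw [hsucc]
    have hr' : (r : Int) ≤ 2*n - 1 := by omega
    rw [ih hr',
      PySem.List.pyRange_one_cons (show 2*n - 1 - ((r : Int) + 1) < 2*n - 1 by omega),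
      List.flatMap_cons, hsucc]

-- ===== VERDICT (by name: the statement is the Claim_ definition above) =====
theorem create_zig_zag_pattern_spec : Claim_equal_create_zig_zag_pattern := by
  intro n _ hpre
  unfold Spec_create_zig_zag_pattern
  by_cases h0 : n = 0
  · subst h0; decide
  · have hn : 1 ≤ n := by
      unfold Pre_create_zig_zag_pattern at hpre; omega
    have hB : create_zig_zag_pattern_alt n
        = (PySem.List.pyRange 0 (2*n - 1) 1).flatMap (pvDiag n) := by
      unfold create_zig_zag_pattern_alt
      rw [PySem.List.foldl_append_eq_flatMap]
      rfl
    have hw := walk_suffix n hn ((2*n - 1).toNat) (by omega)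
    have hc : (((2*n - 1).toNat : Nat) : Int) = 2*n - 1 := by omega
    rw [hc] at hw
    have hz : 2*n - 1 - (2*n - 1) = 0 := by ring
    rw [hz] at hw
    have e1 : pvSX n 0 = 0 := by simp only [pvSX]; rw [if_pos (show (0:Int) % 2 = 0 by omega)]; omega
    have e2 : pvSY n 0 = 0 := by simp only [pvSY, e1]; ring
    have e3 : pvSD 0 = 1 := by simp only [pvSD]; rw [if_pos (show (0:Int) % 2 = 0 by omega)]
    rw [e1, e2, e3, pvF_value n hn] at hw
    unfold create_zig_zag_pattern
    rw [hB, hw]
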